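-- pv_equiv track=rewrite | github.com/rinatmamedov19/variant10 | task1/task1/tasks2_4/tasks2_4/tasks2_4/tasks6_8/tasks6_8/tasks6_8/tasks11_14/tasks11_14/tasks11_14/tasks11_14/tasks_final/tasks_final/tasks_final/tasks_final/tasks_final/task58.py | count_elements_as_sum
-- ===== SOURCE A (Python) =====
-- def count_elements_as_sum(arr):
--     if len(arr) < 3:
--         return 0
--     sums = set()
--     for i in range(len(arr)):
--         for j in range(i+1, len(arr)):
--             sums.add(arr[i] + arr[j])
--     return sum(1 for x in arr if x in sums)
-- ===== SOURCE B (Python) =====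
-- def count_elements_as_sum(arr):
--     if len(arr) < 3:
--         return 0
--     s = sorted(arr)
--     n = len(s)
--     count = 0
--     for x in arr:
--         l, r = 0, n - 1
--         while l < r:
--             t = s[l] + s[r]
--             if t == x:
--                 count += 1
--                 break
--             elif t < x:
--                 l += 1
--             else:
--                 r -= 1
--     return count
-- ===== Notes on version B (the rewrite author's own statement) =====
-- stated objective: alternative
-- what changed: Instead of materialising the set of all pairwise sums and testing membership, B sorts a copy once and, for each element of the original array, runs a two-pointer search over the sorted copy to decide whether some pair sums to it; this uses O(n) extra space instead of the O(n^2)-sized sum set.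
import Mathlib
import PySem

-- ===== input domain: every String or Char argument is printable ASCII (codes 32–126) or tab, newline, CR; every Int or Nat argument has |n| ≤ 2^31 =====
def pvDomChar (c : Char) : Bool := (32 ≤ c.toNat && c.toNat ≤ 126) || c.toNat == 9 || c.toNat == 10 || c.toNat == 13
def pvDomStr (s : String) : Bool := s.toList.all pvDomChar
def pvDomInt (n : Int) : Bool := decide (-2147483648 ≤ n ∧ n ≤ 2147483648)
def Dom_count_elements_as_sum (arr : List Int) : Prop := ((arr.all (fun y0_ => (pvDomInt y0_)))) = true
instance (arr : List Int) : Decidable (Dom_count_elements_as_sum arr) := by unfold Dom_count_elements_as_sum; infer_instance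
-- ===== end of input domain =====

-- B replaces A's materialised set of all pairwise sums by a per-element two-pointer
-- search over a sorted copy (same O(n^2) time, O(n) instead of O(n^2) extra space).

-- ===== PORT A =====
def count_elements_as_sum (arr : List Int) : Int :=
  if PySem.List.len arr < 3 then 0
  else
    let sums : PySem.Set Int :=
      (PySem.List.pyRange 0 (PySem.List.len arr) 1).foldl (fun s i =>
        (PySem.List.pyRange (i+1) (PySem.List.len arr) 1).foldl (fun s j =>
          PySem.Set.add s (PySem.List.pyGetD arr i 0 + PySem.List.pyGetD arr j 0)) s)
        PySem.Set.empty
    arr.foldl (fun acc x => if PySem.Set.contains sums x then acc + 1 else acc) 0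

-- ===== PORT B =====
-- the while-loop of Source B: advance l / retreat r on the sorted copy until the pair sum hits x
def pvTwoPtr (s : List Int) (x : Int) (l r : Nat) : Bool :=
  if _h : l < r then
    let t := s.getD l 0 + s.getD r 0
    if t = x then true
    else if t < x then pvTwoPtr s x (l+1) r
    else pvTwoPtr s x l (r-1)
  else false
  termination_by r - l

def count_elements_as_sum_alt (arr : List Int) : Int :=
  if PySem.List.len arr < 3 then 0
  else
    let s := PySem.List.sorted arr (fun x => x) false
    let n := s.length
    arr.foldl (fun c x => if pvTwoPtr s x 0 (n-1) then c + 1 else c) 0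

-- ===== PRECONDITION & SPEC =====
def Spec_count_elements_as_sum (arr : List Int) (out : Int) : Prop := out = count_elements_as_sum_alt arr
instance (arr : List Int) (out : Int) : Decidable (Spec_count_elements_as_sum arr out) := by unfold Spec_count_elements_as_sum; infer_instance

-- ===== CLAIM (what is proved, stated in full; the proofs are below) =====
def Claim_equal_count_elements_as_sum : Prop := ∀ (arr : List Int), Dom_count_elements_as_sum arr → Spec_count_elements_as_sum arr (count_elements_as_sum arr)

-- ===== LEMMAS AND PROOFS =====

-- "some two distinct positions of l sum to t"
def pvHasPair (l : List Int) (t : Int) : Prop :=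
  ∃ i j : Nat, i < j ∧ j < l.length ∧ l.getD i 0 + l.getD j 0 = t

-- bounded-window form used by the two-pointer proof
def pvFound (s : List Int) (x : Int) (l r : Nat) : Prop :=
  ∃ i j : Nat, l ≤ i ∧ i < j ∧ j ≤ r ∧ s.getD i 0 + s.getD j 0 = x

theorem pvHasPair_cons (a : Int) (l : List Int) (t : Int) :
    pvHasPair (a :: l) t ↔ (∃ y ∈ l, a + y = t) ∨ pvHasPair l t := by
  constructor
  · rintro ⟨i, j, hij, hj, hsum⟩
    match i, j with
    | 0, j+1 =>
      left
      refine ⟨l.getD j 0, ?_, ?_⟩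
      · have hjl : j < l.length := by simpa using hj
        rw [List.getD_eq_getElem l 0 hjl]; exact List.getElem_mem hjl
      · simpa using hsum
    | i+1, j+1 =>
      right
      exact ⟨i, j, by omega, by simpa using hj, by simpa using hsum⟩
  · rintro (⟨y, hy, hsum⟩ | ⟨i, j, hij, hj, hsum⟩)
    · obtain ⟨k, hk, hke⟩ := List.mem_iff_getElem.1 hy
      refine ⟨0, k+1, by omega, by simpa using hk, ?_⟩
      simp [List.getD, List.getElem?_eq_getElem hk, hke, hsum]
    · exact ⟨i+1, j+1, by omega, by simpa using hj, by simpa using hsum⟩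

theorem pvHasPair_perm {l l' : List Int} (h : l.Perm l') (t : Int) :
    pvHasPair l t ↔ pvHasPair l' t := by
  induction h with
  | nil => rfl
  | cons a h ih =>
      rw [pvHasPair_cons, pvHasPair_cons, ih]
      constructor <;> rintro (⟨y, hy, hs⟩ | hp)
      · exact Or.inl ⟨y, h.mem_iff.1 hy, hs⟩
      · exact Or.inr hp
      · exact Or.inl ⟨y, h.mem_iff.2 hy, hs⟩
      · exact Or.inr hp
  | swap a b l =>
      rw [pvHasPair_cons, pvHasPair_cons, pvHasPair_cons, pvHasPair_cons]
      simp only [List.mem_cons]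
      constructor <;> rintro h
      · rcases h with (⟨y, (rfl | hy), hs⟩ | ⟨y, hy, hs⟩ | hp)
        · exact Or.inl ⟨b, Or.inl rfl, by linarith [hs]⟩
        · exact Or.inr (Or.inl ⟨y, hy, hs⟩)
        · exact Or.inl ⟨y, Or.inr hy, hs⟩
        · exact Or.inr (Or.inr hp)
      · rcases h with (⟨y, (rfl | hy), hs⟩ | ⟨y, hy, hs⟩ | hp)
        · exact Or.inl ⟨a, Or.inl rfl, by linarith [hs]⟩
        · exact Or.inr (Or.inl ⟨y, hy, hs⟩)
        · exact Or.inl ⟨y, Or.inr hy, hs⟩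
        · exact Or.inr (Or.inr hp)
  | trans _ _ ih1 ih2 => rw [ih1, ih2]

-- membership in a foldl of Set.add
theorem pv_mem_foldl_add {α : Type} (f : α → Int) (t : Int) :
    ∀ (lst : List α) (s : PySem.Set Int),
      t ∈ lst.foldl (fun s a => PySem.Set.add s (f a)) s ↔ t ∈ s ∨ ∃ a ∈ lst, f a = t := by
  intro lst
  induction lst with
  | nil => simp
  | cons a lst ih =>
      intro s
      rw [List.foldl_cons, ih]
      simp only [PySem.Set.mem_add, List.mem_cons]
      constructor
      · rintro ((h | h) | ⟨b, hb, he⟩)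
        · exact Or.inl h
        · exact Or.inr ⟨a, Or.inl rfl, h.symm⟩
        · exact Or.inr ⟨b, Or.inr hb, he⟩
      · rintro (h | ⟨b, (rfl | hb), he⟩)
        · exact Or.inl (Or.inl h)
        · exact Or.inl (Or.inr he.symm)
        · exact Or.inr ⟨b, hb, he⟩

-- membership in A's nested foldl
theorem pv_mem_sums (arr : List Int) (t : Int) :
    ∀ (lst : List Int) (s : PySem.Set Int),
      t ∈ lst.foldl (fun s i =>
            (PySem.List.pyRange (i+1) (PySem.List.len arr) 1).foldl (fun s j =>
              PySem.Set.add s (PySem.List.pyGetD arr i 0 + PySem.List.pyGetD arr j 0)) s) s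
        ↔ t ∈ s ∨ ∃ i ∈ lst, ∃ j ∈ PySem.List.pyRange (i+1) (PySem.List.len arr) 1,
            PySem.List.pyGetD arr i 0 + PySem.List.pyGetD arr j 0 = t := by
  intro lst
  induction lst with
  | nil => simp
  | cons a lst ih =>
      intro s
      rw [List.foldl_cons, ih]
      rw [pv_mem_foldl_add]
      simp only [List.mem_cons]
      constructor
      · rintro ((h | h) | ⟨i, hi, hj⟩)
        · exact Or.inl h
        · exact Or.inr ⟨a, Or.inl rfl, h⟩
        · exact Or.inr ⟨i, Or.inr hi, hj⟩
      · rintro (h | ⟨i, (rfl | hi), hj⟩)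
        · exact Or.inl (Or.inl h)
        · exact Or.inl (Or.inr hj)
        · exact Or.inr ⟨i, hi, hj⟩

theorem pv_sums_iff_hasPair (arr : List Int) (t : Int) :
    (t ∈ (PySem.List.pyRange 0 (PySem.List.len arr) 1).foldl (fun s i =>
            (PySem.List.pyRange (i+1) (PySem.List.len arr) 1).foldl (fun s j =>
              PySem.Set.add s (PySem.List.pyGetD arr i 0 + PySem.List.pyGetD arr j 0)) s)
          PySem.Set.empty)
      ↔ pvHasPair arr t := by
  rw [pv_mem_sums]
  simp only [PySem.Set.empty, List.not_mem_nil, false_or, PySem.List.mem_pyRange_one,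
    PySem.List.len_eq]
  constructor
  · rintro ⟨i, ⟨hi0, hin⟩, j, ⟨hij, hjn⟩, hsum⟩
    refine ⟨i.toNat, j.toNat, by omega, by omega, ?_⟩
    rw [PySem.List.pyGetD_eq_getElem arr 0 hi0 (by omega),
        PySem.List.pyGetD_eq_getElem arr 0 (by omega : (0:Int) ≤ j) (by omega)] at hsum
    rw [List.getD_eq_getElem arr 0 (by omega : i.toNat < arr.length),
        List.getD_eq_getElem arr 0 (by omega : j.toNat < arr.length)]
    exact hsum
  · rintro ⟨i, j, hij, hj, hsum⟩
    refine ⟨(i : Int), ⟨by omega, by omega⟩, (j : Int), ⟨by omega, by omega⟩, ?_⟩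
    rw [PySem.List.pyGetD_eq_getElem arr 0 (by omega : (0:Int) ≤ (i:Int)) (by omega : (i:Int) < arr.length),
        PySem.List.pyGetD_eq_getElem arr 0 (by omega : (0:Int) ≤ (j:Int)) (by omega : (j:Int) < arr.length)]
    rw [List.getD_eq_getElem arr 0 (by omega : i < arr.length),
        List.getD_eq_getElem arr 0 hj] at hsum
    simpa using hsum

-- two-pointer correctness on the sorted copy
theorem pv_twoPtr_iff (arr : List Int) (x : Int) :
    ∀ (fuel l r : Nat), r - l ≤ fuel → r < (PySem.List.sorted arr (fun x => x) false).length →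
      (pvTwoPtr (PySem.List.sorted arr (fun x => x) false) x l r = true ↔
        pvFound (PySem.List.sorted arr (fun x => x) false) x l r) := by
  set s := PySem.List.sorted arr (fun x => x) false with hs
  have mono : ∀ p q : Nat, p ≤ q → q < s.length → s.getD p 0 ≤ s.getD q 0 := by
    intro p q hpq hq
    rw [List.getD_eq_getElem s 0 (by omega), List.getD_eq_getElem s 0 hq]
    exact PySem.List.sorted_id_getElem_mono arr hpq hq
  intro fuel
  induction fuel with
  | zero =>
      intro l r hfuel hr
      have hlr : ¬ l < r := by omega
      rw [pvTwoPtr]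
      simp only [hlr, dif_neg, not_false_iff]
      constructor
      · intro h; cases h
      · rintro ⟨i, j, h1, h2, h3, _⟩; omega
  | succ fuel ih =>
      intro l r hfuel hr
      rw [pvTwoPtr]
      by_cases hlr : l < r
      · simp only [hlr, dif_pos]
        set t := s.getD l 0 + s.getD r 0 with ht
        by_cases heq : t = x
        · simp only [heq, if_pos]
          constructor
          · intro _; exact ⟨l, r, le_refl _, hlr, le_refl _, heq⟩
          · intro _; trivial
        · simp only [heq, if_neg, not_false_iff]
          by_cases hlt : t < x
          · simp only [hlt, if_pos]
            rw [ih (l+1) r (by omega) hr]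
            constructor
            · rintro ⟨i, j, h1, h2, h3, h4⟩
              exact ⟨i, j, by omega, h2, h3, h4⟩
            · rintro ⟨i, j, h1, h2, h3, h4⟩
              refine ⟨i, j, ?_, h2, h3, h4⟩
              rcases Nat.lt_or_ge l i with h | h
              · omega
              · exfalso
                have hil : i = l := by omega
                have : s.getD j 0 ≤ s.getD r 0 := mono j r h3 hr
                subst hil
                omega
          · simp only [hlt, if_neg, not_false_iff]
            have hgt : x < t := by omega
            rw [ih l (r-1) (by omega) (by omega)]
            constructor
            · rintro ⟨i, j, h1, h2, h3, h4⟩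
              exact ⟨i, j, h1, h2, by omega, h4⟩
            · rintro ⟨i, j, h1, h2, h3, h4⟩
              refine ⟨i, j, h1, h2, ?_, h4⟩
              rcases Nat.lt_or_ge j r with h | h
              · omega
              · exfalso
                have hjr : j = r := by omega
                have : s.getD l 0 ≤ s.getD i 0 := mono l i h1 (by omega)
                subst hjr
                omega
      · simp only [hlr, dif_neg, not_false_iff]
        constructor
        · intro h; cases h
        · rintro ⟨i, j, h1, h2, h3, _⟩; omega

theorem pv_found_zero_iff (s : List Int) (x : Int) (h : 0 < s.length) :
    pvFound s x 0 (s.length - 1) ↔ pvHasPair s x := by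
  constructor
  · rintro ⟨i, j, _, h2, h3, h4⟩; exact ⟨i, j, h2, by omega, h4⟩
  · rintro ⟨i, j, h1, h2, h3⟩; exact ⟨i, j, Nat.zero_le _, h1, by omega, h3⟩

theorem pv_foldl_count_congr (p q : Int → Bool) :
    ∀ (arr : List Int) (acc : Int), (∀ x ∈ arr, p x = q x) →
      arr.foldl (fun c x => if p x then c + 1 else c) acc
        = arr.foldl (fun c x => if q x then c + 1 else c) acc := by
  intro arr
  induction arr with
  | nil => intro acc _; rfl
  | cons a arr ih =>
      intro acc h
      rw [List.foldl_cons, List.foldl_cons, h a (List.mem_cons_self ..)]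
      exact ih _ (fun x hx => h x (List.mem_cons_of_mem _ hx))

-- ===== VERDICT (by name: the statement is the Claim_ definition above) =====
theorem count_elements_as_sum_spec : Claim_equal_count_elements_as_sum := by
  intro arr _
  unfold Spec_count_elements_as_sum count_elements_as_sum count_elements_as_sum_alt
  by_cases hlen : PySem.List.len arr < 3
  · rw [if_pos hlen, if_pos hlen]
  · simp only [hlen, if_neg, not_false_iff]
    apply pv_foldl_count_congr
    intro x _
    have hlen3 : 3 ≤ arr.length := by
      have := PySem.List.len_eq arr; omega
    have hslen : (PySem.List.sorted arr (fun x => x) false).length = arr.length :=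
      PySem.List.length_sorted ..
    have hperm : (PySem.List.sorted arr (fun x => x) false).Perm arr :=
      PySem.List.sorted_perm ..
    have h1 : PySem.Set.contains
        ((PySem.List.pyRange 0 (PySem.List.len arr) 1).foldl (fun s i =>
          (PySem.List.pyRange (i+1) (PySem.List.len arr) 1).foldl (fun s j =>
            PySem.Set.add s (PySem.List.pyGetD arr i 0 + PySem.List.pyGetD arr j 0)) s)
          PySem.Set.empty) x = true ↔ pvHasPair arr x := by
      rw [PySem.Set.contains_iff]
      exact pv_sums_iff_hasPair arr x
    have h2 : pvTwoPtr (PySem.List.sorted arr (fun x => x) false) x 0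
        ((PySem.List.sorted arr (fun x => x) false).length - 1) = true ↔ pvHasPair arr x := by
      rw [pv_twoPtr_iff arr x ((PySem.List.sorted arr (fun x => x) false).length)
            0 _ (by omega) (by omega),
          pv_found_zero_iff _ _ (by omega),
          pvHasPair_perm hperm]
    rw [Bool.eq_iff_iff, h1, h2]
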